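-- pv_equiv track=rewrite | github.com/ZachChuba/SudokuSolverGeneticAlg | paper1method.py | fitness_col
-- ===== SOURCE A (Python) =====
-- def fitness_col(group, DIM=9, SQRT_DIM=3):
--   fitness = 0
--   for k in range(SQRT_DIM):
--     unique_set = set()
--     for i in range(SQRT_DIM):
--       for j in range(SQRT_DIM):
--         unique_set.add(group[i][SQRT_DIM*j+k])
--     fitness += len(unique_set)
--   return fitness
-- ===== SOURCE B (Python) =====
-- def fitness_col(group, DIM=9, SQRT_DIM=3):
--   total = 0
--   for k in range(SQRT_DIM):
--     vals = sorted(group[i][SQRT_DIM * j + k]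
--                   for i in range(SQRT_DIM) for j in range(SQRT_DIM))
--     prev = None
--     for v in vals:
--       if prev is None or v != prev:
--         total += 1
--       prev = v
--   return total
-- ===== Notes on version B (the rewrite author's own statement) =====
-- stated objective: alternative
-- what changed: Replaces A's hash-set distinct counting (building a set per sub-block column class and summing set sizes) by sort-then-scan: the cells of each class are sorted and the distinct count is obtained by a linear scan counting positions whose value differs from the previous one; no set is used at all.
import Mathlib
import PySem

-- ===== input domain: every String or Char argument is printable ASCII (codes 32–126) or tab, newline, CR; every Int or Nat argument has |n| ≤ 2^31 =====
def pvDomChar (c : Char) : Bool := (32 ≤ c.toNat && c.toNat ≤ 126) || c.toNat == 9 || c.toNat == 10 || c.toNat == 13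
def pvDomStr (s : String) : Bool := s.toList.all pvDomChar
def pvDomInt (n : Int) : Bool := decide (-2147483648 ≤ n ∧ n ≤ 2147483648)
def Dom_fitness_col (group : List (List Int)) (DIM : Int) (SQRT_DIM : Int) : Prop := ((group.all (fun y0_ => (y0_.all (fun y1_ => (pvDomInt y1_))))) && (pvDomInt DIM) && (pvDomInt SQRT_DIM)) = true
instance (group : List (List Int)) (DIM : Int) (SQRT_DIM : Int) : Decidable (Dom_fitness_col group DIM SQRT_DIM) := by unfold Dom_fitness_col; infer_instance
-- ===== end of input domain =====

-- B counts the distinct values of each sub-block column class by sorting them and scanning for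
-- value changes, instead of A's hash set; same cost class ("alternative").

-- ===== PORT A =====
def fitness_col (group : List (List Int)) (DIM : Int) (SQRT_DIM : Int) : Int :=
  (PySem.List.pyRange 0 SQRT_DIM 1).foldl (fun fitness k =>
    fitness + PySem.Set.len (
      (PySem.List.pyRange 0 SQRT_DIM 1).foldl (fun us i =>
        (PySem.List.pyRange 0 SQRT_DIM 1).foldl (fun us j =>
          PySem.Set.add us (PySem.List.pyGetD (PySem.List.pyGetD group i []) (SQRT_DIM * j + k) 0)) us)
        PySem.Set.empty)) 0

-- ===== PORT B =====
-- the generator feeding sorted(): group[i][SQRT_DIM*j+k] for i in range(S) for j in range(S)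
def pvGather (group : List (List Int)) (S k : Int) : List Int :=
  (PySem.List.pyRange 0 S 1).flatMap (fun i =>
    (PySem.List.pyRange 0 S 1).map (fun j =>
      PySem.List.pyGetD (PySem.List.pyGetD group i []) (S * j + k) 0))

def fitness_col_alt (group : List (List Int)) (DIM : Int) (SQRT_DIM : Int) : Int :=
  (PySem.List.pyRange 0 SQRT_DIM 1).foldl (fun total k =>
    let vals := PySem.List.sorted (pvGather group SQRT_DIM k) (fun x => x) false
    (vals.foldl (fun (st : Int × Option Int) v =>
      (match st.2 with
       | none => st.1 + 1
       | some p => if v ≠ p then st.1 + 1 else st.1, some v)) (total, none)).1) 0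

-- ===== PRECONDITION & SPEC =====
-- Pre_ excludes exactly the inputs on which Python A raises IndexError: when SQRT_DIM > 0 it reads
-- rows 0..SQRT_DIM-1 of group and cells 0..SQRT_DIM^2-1 of each of those rows.
def Pre_fitness_col (group : List (List Int)) (DIM : Int) (SQRT_DIM : Int) : Prop :=
  0 < SQRT_DIM → (SQRT_DIM ≤ (group.length : Int) ∧
    ∀ row ∈ group.take SQRT_DIM.toNat, SQRT_DIM * SQRT_DIM ≤ (row.length : Int))
instance (group : List (List Int)) (DIM : Int) (SQRT_DIM : Int) : Decidable (Pre_fitness_col group DIM SQRT_DIM) := by unfold Pre_fitness_col; infer_instance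

def pvWitness_fitness_col : List (List Int) × Int × Int := ([[1, 2, 3, 4], [3, 4, 1, 2]], 4, 2)

def Spec_fitness_col (group : List (List Int)) (DIM : Int) (SQRT_DIM : Int) (out : Int) : Prop := out = fitness_col_alt group DIM SQRT_DIM
instance (group : List (List Int)) (DIM : Int) (SQRT_DIM : Int) (out : Int) : Decidable (Spec_fitness_col group DIM SQRT_DIM out) := by unfold Spec_fitness_col; infer_instance

-- ===== CLAIM (what is proved, stated in full; the proofs are below) =====
def Claim_equal_fitness_col : Prop := ∀ (group : List (List Int)) (DIM : Int) (SQRT_DIM : Int), Dom_fitness_col group DIM SQRT_DIM → Pre_fitness_col group DIM SQRT_DIM → Spec_fitness_col group DIM SQRT_DIM (fitness_col group DIM SQRT_DIM)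

-- ===== LEMMAS AND PROOFS =====

-- card(insert y s) = card(s \ {y}) + 1
lemma pv_card_insert (y : Int) (s : Finset Int) :
    (insert y s).card = (s.erase y).card + 1 := by
  have h : insert y s = insert y (s.erase y) := by
    ext z
    simp only [Finset.mem_insert, Finset.mem_erase]
    constructor
    · rintro (rfl | hz)
      · exact Or.inl rfl
      · by_cases hzy : z = y
        · exact Or.inl hzy
        · exact Or.inr ⟨hzy, hz⟩
    · rintro (rfl | ⟨_, hz⟩)
      · exact Or.inl rfl
      · exact Or.inr hz
  rw [h, Finset.card_insert_of_notMem (Finset.notMem_erase _ _)]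

-- B's run-counting scan, continuing after having seen p (all remaining values ≥ p, sorted):
-- it adds exactly the number of distinct values other than p.
lemma pv_scan_some (vals : List Int) (hs : vals.Pairwise (· ≤ ·)) (t p : Int)
    (hp : ∀ y ∈ vals, p ≤ y) :
    (vals.foldl (fun (st : Int × Option Int) v =>
      (match st.2 with
       | none => st.1 + 1
       | some q => if v ≠ q then st.1 + 1 else st.1, some v)) (t, some p)).1
    = t + ((vals.toFinset.erase p).card : Int) := by
  induction vals generalizing t p with
  | nil => simp
  | cons y ys ih =>
    have hys : ys.Pairwise (· ≤ ·) := hs.tail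
    have hyle : ∀ z ∈ ys, y ≤ z := fun z hz => (List.pairwise_cons.mp hs).1 z hz
    have hpy : p ≤ y := hp y (by simp)
    by_cases hne : y ≠ p
    · have hstep : ((t, some p).1 + 1, some y)
          = ((t + 1 : Int), some y) := rfl
      simp only [List.foldl_cons, if_pos hne]
      rw [ih hys (t + 1) y hyle]
      have hplt : p < y := lt_of_le_of_ne hpy (fun h => hne h.symm)
      have hpnot : p ∉ insert y ys.toFinset := by
        simp only [Finset.mem_insert, List.mem_toFinset]
        rintro (h | h)
        · omega
        · have := hyle p h; omega
      have h1 : ((y :: ys).toFinset.erase p) = insert y ys.toFinset := by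
        rw [List.toFinset_cons, Finset.erase_eq_self.mpr hpnot]
      rw [h1, pv_card_insert y ys.toFinset]
      push_cast
      ring
    · push Not at hne
      subst hne
      simp only [List.foldl_cons, if_neg (show ¬ (y ≠ y) from by simp)]
      rw [ih hys t y hyle]
      congr 2
      rw [List.toFinset_cons, Finset.erase_insert_eq_erase]

-- B's scan from the initial (t, None) state on a sorted list counts the distinct values.
lemma pv_scan_none (vals : List Int) (hs : vals.Pairwise (· ≤ ·)) (t : Int) :
    (vals.foldl (fun (st : Int × Option Int) v =>
      (match st.2 with
       | none => st.1 + 1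
       | some q => if v ≠ q then st.1 + 1 else st.1, some v)) (t, none)).1
    = t + (vals.toFinset.card : Int) := by
  cases vals with
  | nil => simp
  | cons y ys =>
    have hyle : ∀ z ∈ ys, y ≤ z := fun z hz => (List.pairwise_cons.mp hs).1 z hz
    simp only [List.foldl_cons]
    rw [pv_scan_some ys hs.tail (t + 1) y hyle]
    rw [List.toFinset_cons, pv_card_insert y ys.toFinset]
    push_cast
    ring

-- A's nested double loop of set-adds is Set.ofList of the gathered cells.
lemma pv_A_set (group : List (List Int)) (S k : Int) :
    (PySem.List.pyRange 0 S 1).foldl (fun us i =>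
        (PySem.List.pyRange 0 S 1).foldl (fun us j =>
          PySem.Set.add us (PySem.List.pyGetD (PySem.List.pyGetD group i []) (S * j + k) 0)) us)
        PySem.Set.empty
      = PySem.Set.ofList (pvGather group S k) := by
  rw [PySem.Set.ofList_eq_foldl]
  simp only [pvGather, List.foldl_flatMap, List.foldl_map]
  rfl

-- the length of set(l) is the number of distinct elements of l
lemma pv_ofList_len (l : List Int) :
    PySem.Set.len (PySem.Set.ofList l) = (l.toFinset.card : Int) := by
  have hnd : (PySem.Set.ofList l).Nodup := PySem.Set.nodup_ofList l
  have hmem : ∀ x, x ∈ PySem.Set.ofList l ↔ x ∈ l := fun x => PySem.Set.mem_ofList l x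
  have htf : (PySem.Set.ofList l).toFinset = l.toFinset := by
    ext x; simp [hmem x]
  have : (PySem.Set.ofList l).length = (PySem.Set.ofList l).toFinset.card :=
    (List.toFinset_card_of_nodup hnd).symm
  simp [PySem.Set.len, this, htf]

-- ===== VERDICT (by name: the statement is the Claim_ definition above) =====
theorem fitness_col_spec : Claim_equal_fitness_col := by
  intro group DIM S _ _
  unfold Spec_fitness_col fitness_col fitness_col_alt
  apply PySem.List.foldl_congr_mem
  intro acc k _
  simp only []
  rw [pv_A_set group S k, pv_ofList_len]
  have hs : (PySem.List.sorted (pvGather group S k) (fun x => x) false).Pairwise (· ≤ ·) := by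
    have := PySem.List.sorted_pairwise (xs := pvGather group S k) (key := fun x => x)
    simpa using this
  rw [pv_scan_none _ hs acc]
  congr 2
  rw [List.toFinset_eq_of_perm _ _ (PySem.List.sorted_perm (pvGather group S k) (fun x => x) false)]
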